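-- pv_equiv track=rewrite | github.com/TaskWizer/LiteTTS | LiteTTS/api/validators.py | _has_valid_characters
-- ===== SOURCE A (Python) =====
-- def _has_valid_characters(text: str) -> bool:
--     """Check if text contains only valid characters"""
--     # Allow most printable characters, including Unicode
--     # Exclude control characters except common ones
--     allowed_control_chars = {'\n', '\r', '\t'}
--
--     for char in text:
--         if char.isprintable() or char in allowed_control_chars:
--             continue
--         else:
--             return False
--
--     return True
-- ===== SOURCE B (Python) =====
-- def _has_valid_characters(text: str) -> bool:
--     """Check if text contains only valid characters"""
--     # Delete the three allowed control chars, then test the rest in one call.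
--     return text.translate({9: None, 10: None, 13: None}).isprintable()
-- ===== Notes on version B (the rewrite author's own statement) =====
-- stated objective: simpler
-- what changed: Replaces the explicit per-character Python loop with per-char branching by a single str.translate deleting tab/newline/CR followed by one whole-string .isprintable() call.
import Mathlib
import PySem

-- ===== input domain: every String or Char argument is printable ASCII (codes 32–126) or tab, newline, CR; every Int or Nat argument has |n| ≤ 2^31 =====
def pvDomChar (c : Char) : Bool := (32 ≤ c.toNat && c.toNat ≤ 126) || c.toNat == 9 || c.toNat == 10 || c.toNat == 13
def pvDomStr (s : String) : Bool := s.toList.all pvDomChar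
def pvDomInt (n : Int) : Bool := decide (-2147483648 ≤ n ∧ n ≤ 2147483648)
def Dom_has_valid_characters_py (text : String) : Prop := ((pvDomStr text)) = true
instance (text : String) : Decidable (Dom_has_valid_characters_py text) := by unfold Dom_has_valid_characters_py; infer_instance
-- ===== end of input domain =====

-- B replaces A's per-character loop with one filter (delete tab/newline/CR) plus one whole-string printability test; simpler decomposition, return value only.
-- ===== PORT A =====
-- char.isprintable(): exact on the printable-ASCII + tab/newline/CR domain Dom_ admits
-- (printable ⟺ code in 32..126 there).
def pyIsPrintableA (c : Char) : Bool := 32 ≤ c.toNat && c.toNat ≤ 126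

-- the loop 'for char in text: … return False / return True', step for step
def hvcLoopA : List Char → Bool
  | [] => true
  | c :: cs =>
    if pyIsPrintableA c || (c = '\t' || c = '\n' || c = '\r') then hvcLoopA cs
    else false

def has_valid_characters_py (text : String) : Bool := hvcLoopA text.toList

-- ===== PORT B =====
-- same isprintable primitive, written independently for B's side
def pyIsPrintableB (c : Char) : Bool := 32 ≤ c.toNat && c.toNat ≤ 126

-- text.translate({9: None, 10: None, 13: None}).isprintable()
def has_valid_characters_py_alt (text : String) : Bool :=
  (text.toList.filter (fun c => !(c.toNat = 9 || c.toNat = 10 || c.toNat = 13))).all pyIsPrintableB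

-- ===== PRECONDITION & SPEC =====
def Spec_has_valid_characters_py (text : String) (out : Bool) : Prop := out = has_valid_characters_py_alt text
instance (text : String) (out : Bool) : Decidable (Spec_has_valid_characters_py text out) := by unfold Spec_has_valid_characters_py; infer_instance

-- ===== CLAIM (what is proved, stated in full; the proofs are below) =====
def Claim_equal_has_valid_characters_py : Prop := ∀ (text : String), Dom_has_valid_characters_py text → Spec_has_valid_characters_py text (has_valid_characters_py text)

-- ===== LEMMAS AND PROOFS =====

-- ===== VERDICT (by name: the statement is the Claim_ definition above) =====
lemma char_eq_iff_toNat (c d : Char) : (c = d) ↔ c.toNat = d.toNat :=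
  ⟨fun h => h ▸ rfl, fun h => Char.ext (UInt32.toNat_inj.mp h)⟩

lemma hvc_list_eq (cs : List Char) :
    hvcLoopA cs = (cs.filter (fun c => !(c.toNat = 9 || c.toNat = 10 || c.toNat = 13))).all pyIsPrintableB := by
  induction cs with
  | nil => rfl
  | cons c cs ih =>
    have h9 : ('\t' : Char).toNat = 9 := rfl
    have h10 : ('\n' : Char).toNat = 10 := rfl
    have h13 : ('\r' : Char).toNat = 13 := rfl
    simp only [hvcLoopA, List.filter_cons, char_eq_iff_toNat, h9, h10, h13]
    by_cases hc : c.toNat = 9 ∨ c.toNat = 10 ∨ c.toNat = 13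
    · rcases hc with h | h | h <;> simp [h, ih]
    · push Not at hc
      obtain ⟨n9, n10, n13⟩ := hc
      by_cases hp : pyIsPrintableA c
      · simp [hp, n9, n10, n13, ih, List.all_cons,
          show pyIsPrintableB c = true from hp]
      · have hpB : pyIsPrintableB c = false := by
          simpa [pyIsPrintableB] using (by simpa [pyIsPrintableA] using hp : ¬ (32 ≤ c.toNat ∧ c.toNat ≤ 126))
        simp [hp, n9, n10, n13, List.all_cons, hpB]

theorem has_valid_characters_py_spec : Claim_equal_has_valid_characters_py := by
  intro text _
  unfold Spec_has_valid_characters_py has_valid_characters_py has_valid_characters_py_alt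
  exact hvc_list_eq text.toList
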